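-- pv_equiv track=rewrite | github.com/BhaveshWagh/learn_python | dict_is_1_to_1.py | is_1_to_1
-- ===== SOURCE A (Python) =====
-- def is_1_to_1(dictionary):
--
--     if len(dictionary) == 0:
--         return True
--
--     value_set = set()
--
--     for key in dictionary.keys():
--         value = dictionary[key]
--         if value in value_set:
--             return False
--         else:
--             value_set.add(value)
--
--     return True
-- ===== SOURCE B (Python) =====
-- def is_1_to_1(dictionary):
--     vals = sorted(dictionary.values())
--     return all(a != b for a, b in zip(vals, vals[1:]))
-- ===== Notes on version B (the rewrite author's own statement) =====
-- stated objective: alternative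
-- what changed: Replaced A's hash-set early-exit membership loop by sort-then-adjacent-scan: sort the values and check that no two neighbours in the sorted order are equal (duplicates are adjacent after sorting).
import Mathlib
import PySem

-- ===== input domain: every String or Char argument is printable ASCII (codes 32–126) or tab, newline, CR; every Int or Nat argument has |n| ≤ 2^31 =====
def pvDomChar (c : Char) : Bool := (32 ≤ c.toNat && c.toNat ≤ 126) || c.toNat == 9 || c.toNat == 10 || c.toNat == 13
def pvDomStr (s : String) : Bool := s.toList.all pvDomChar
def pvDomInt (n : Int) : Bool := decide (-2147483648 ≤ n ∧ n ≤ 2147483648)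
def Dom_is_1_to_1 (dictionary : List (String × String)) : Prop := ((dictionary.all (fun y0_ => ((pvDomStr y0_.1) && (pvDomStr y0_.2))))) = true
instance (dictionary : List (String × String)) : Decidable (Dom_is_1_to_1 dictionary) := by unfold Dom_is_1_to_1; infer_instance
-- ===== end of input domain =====

-- B replaces A's hash-set early-exit membership loop by sort-then-adjacent-scan:
-- duplicates are adjacent after sorting, so checking neighbours suffices. Same result, different algorithm.

-- ===== PORT A =====
-- the 'for key in dictionary.keys(): value = dictionary[key]; …' loop.
-- Every key comes from d.keys, so dictionary[key] never raises; getD with a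
-- dummy default is exact there.
def is1to1LoopA (d : PySem.Dict String String) (keys : List String)
    (value_set : PySem.Set String) : Bool :=
  match keys with
  | [] => true
  | key :: rest =>
    let value := d.getD key ""
    if value_set.contains value then false
    else is1to1LoopA d rest (PySem.Set.add value_set value)

def is_1_to_1 (dictionary : List (String × String)) : Bool :=
  let d := PySem.Dict.ofList dictionary
  if d.size == 0 then true
  else is1to1LoopA d d.keys PySem.Set.empty

-- ===== PORT B =====
-- vals = sorted(dictionary.values()); all(a != b for a, b in zip(vals, vals[1:]))
def is_1_to_1_alt (dictionary : List (String × String)) : Bool :=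
  let vals := PySem.List.sorted (PySem.Dict.ofList dictionary).values (fun x => x) false
  (vals.zip (PySem.List.slice vals (some 1) none)).all (fun p => p.1 != p.2)

-- ===== PRECONDITION & SPEC =====
def Spec_is_1_to_1 (dictionary : List (String × String)) (out : Bool) : Prop := out = is_1_to_1_alt dictionary
instance (dictionary : List (String × String)) (out : Bool) : Decidable (Spec_is_1_to_1 dictionary out) := by unfold Spec_is_1_to_1; infer_instance

-- ===== CLAIM (what is proved, stated in full; the proofs are below) =====
def Claim_equal_is_1_to_1 : Prop := ∀ (dictionary : List (String × String)), Dom_is_1_to_1 dictionary → Spec_is_1_to_1 dictionary (is_1_to_1 dictionary)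

-- ===== LEMMAS AND PROOFS =====

-- A's loop returns true iff the seen set together with the remaining values is duplicate-free.
theorem pvLoopA_eq_nodup (keys : List String) (d : PySem.Dict String String)
    (s : PySem.Set String) (hs : s.Nodup) :
    is1to1LoopA d keys s = decide ((s ++ keys.map (fun k => d.getD k "")).Nodup) := by
  induction keys generalizing s with
  | nil => simpa [is1to1LoopA] using hs
  | cons key rest ih =>
    simp only [is1to1LoopA, List.map_cons]
    by_cases hmem : (d.getD key "") ∈ s
    · have hc : PySem.Set.contains s (d.getD key "") = true :=
        (PySem.Set.contains_iff s _).2 hmem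
      rw [hc]
      simp only [if_true]
      symm
      rw [decide_eq_false_iff_not]
      intro hnd
      rcases List.nodup_append.1 hnd with ⟨_, _, hdisj⟩
      exact hdisj _ hmem _ (List.mem_cons_self ..) rfl
    · have hc : PySem.Set.contains s (d.getD key "") = false := by
        rw [← Bool.not_eq_true, PySem.Set.contains_iff]; exact hmem
      rw [hc]
      simp only [Bool.false_eq_true, if_false]
      rw [ih (PySem.Set.add s (d.getD key "")) (PySem.Set.nodup_add _ _ hs)]
      rw [PySem.Set.add_of_not_mem hmem]
      congr 1
      simp

-- the adjacent-pair scan of B computes "no two neighbours equal"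
theorem pvZipAdj (xs : List String) :
    ((xs.zip xs.tail).all (fun p => p.1 != p.2) = true) ↔ List.IsChain (· ≠ ·) xs := by
  induction xs with
  | nil => simp
  | cons a t ih =>
    cases t with
    | nil => simp
    | cons b t' =>
      simp only [List.tail_cons, List.zip_cons_cons, List.all_cons, List.isChain_cons_cons,
        Bool.and_eq_true, bne_iff_ne] at *
      rw [ih]

-- on a weakly increasing list, no equal neighbours ↔ no duplicates at all
theorem pvChainNodup (xs : List String) (hp : xs.Pairwise (fun a b => a ≤ b)) :
    List.IsChain (· ≠ ·) xs ↔ xs.Nodup := by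
  constructor
  · intro hc
    have hle : List.IsChain (fun a b : String => a ≤ b) xs := hp.isChain
    have hlt : List.IsChain (· < ·) xs := by
      clear hp
      induction xs with
      | nil => exact List.isChain_nil
      | cons a t iht =>
        cases t with
        | nil => exact List.isChain_singleton a
        | cons b t' =>
          rw [List.isChain_cons_cons] at hc hle ⊢
          exact ⟨lt_of_le_of_ne hle.1 hc.1, iht hc.2 hle.2⟩
    exact (List.isChain_iff_pairwise.1 hlt).imp ne_of_lt
  · intro hnd
    exact (List.Pairwise.isChain hnd)

-- ===== VERDICT (by name: the statement is the Claim_ definition above) =====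
theorem is_1_to_1_spec : Claim_equal_is_1_to_1 := by
  intro dictionary _
  unfold Spec_is_1_to_1 is_1_to_1 is_1_to_1_alt
  set d := PySem.Dict.ofList dictionary with hd
  have hnd : d.keys.Nodup := PySem.Dict.nodup_keys_ofList dictionary
  set vals := PySem.List.sorted d.values (fun x => x) false with hvals
  have hslice : PySem.List.slice vals (some 1) none = vals.tail :=
    PySem.List.slice_from_one vals
  have hB : ((vals.zip (PySem.List.slice vals (some 1) none)).all (fun p => p.1 != p.2))
      = decide (d.values.Nodup) := by
    rw [hslice, Bool.eq_iff_iff, pvZipAdj, decide_eq_true_iff]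
    rw [pvChainNodup vals (PySem.List.sorted_pairwise d.values (fun x => x))]
    exact (PySem.List.sorted_perm d.values (fun x => x) false).nodup_iff
  rw [hB]
  by_cases hz : d.size = 0
  · have hv : d.values = [] := by
      have : d.values.length = 0 := by simp [PySem.Dict.values, PySem.Dict.size] at hz ⊢; omega
      exact List.length_eq_zero_iff.1 this
    simp [hz, hv]
  · have hne : (d.size == 0) = false := by simp [hz]
    simp only [hne, Bool.false_eq_true, if_false]
    rw [pvLoopA_eq_nodup d.keys d PySem.Set.empty List.nodup_nil]
    rw [← PySem.Dict.values_eq_map_keys d hnd ""]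
    simp [PySem.Set.empty]
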